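-- pv_equiv track=rewrite | github.com/abhi19gupta/TwitterAnalytics | Ingestion/plotting.py | take_diff
-- ===== SOURCE A (Python) =====
-- def take_diff(l):
-- 	l = [int(x) for x in l]
-- 	temp = [l[i]-l[i-1] for i in range(1,len(l))]
-- 	ans = []
-- 	prev = 5
-- 	for x in temp:
-- 		ans.append(prev)
-- 		prev+=x
-- 	return ans
-- ===== SOURCE B (Python) =====
-- def take_diff(l):
--     l = [int(x) for x in l]
--     return [5 + l[i] - l[0] for i in range(len(l) - 1)]
-- ===== Notes on version B (the rewrite author's own statement) =====
-- stated objective: simpler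
-- what changed: Replaces the two-pass diff-then-running-accumulator with a direct closed form: by telescoping, each output element is 5 plus the corresponding element minus the first element.
import Mathlib
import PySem

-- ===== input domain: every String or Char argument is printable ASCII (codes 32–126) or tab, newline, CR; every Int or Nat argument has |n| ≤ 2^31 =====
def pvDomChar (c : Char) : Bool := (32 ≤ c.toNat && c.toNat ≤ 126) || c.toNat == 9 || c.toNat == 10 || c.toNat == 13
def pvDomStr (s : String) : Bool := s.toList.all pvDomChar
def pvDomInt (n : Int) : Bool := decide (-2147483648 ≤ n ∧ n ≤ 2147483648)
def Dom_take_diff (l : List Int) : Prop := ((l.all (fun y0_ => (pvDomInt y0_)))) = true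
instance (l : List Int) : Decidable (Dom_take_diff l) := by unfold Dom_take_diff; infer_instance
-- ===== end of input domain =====

-- B replaces A's diff-list + running accumulator by the telescoped closed form 5 + l[i] - l[0]; objective: simpler.
-- ===== PORT A =====
-- l = [int(x) for x in l] is the identity on a list of ints, so the reassignment is elided.
def take_diff (l : List Int) : List Int :=
  let temp := (PySem.List.pyRange 1 (l.length : Int) 1).map
    (fun i => PySem.List.pyGetD l i 0 - PySem.List.pyGetD l (i - 1) 0)
  (temp.foldl (fun (s : List Int × Int) x => (s.1 ++ [s.2], s.2 + x)) (([] : List Int), (5 : Int))).1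

-- ===== PORT B =====
def take_diff_alt (l : List Int) : List Int :=
  (PySem.List.pyRange 0 ((l.length : Int) - 1) 1).map
    (fun i => 5 + PySem.List.pyGetD l i 0 - PySem.List.pyGetD l 0 0)

-- ===== PRECONDITION & SPEC =====
def Spec_take_diff (l : List Int) (out : List Int) : Prop := out = take_diff_alt l
instance (l : List Int) (out : List Int) : Decidable (Spec_take_diff l out) := by unfold Spec_take_diff; infer_instance

-- ===== CLAIM (what is proved, stated in full; the proofs are below) =====
def Claim_equal_take_diff : Prop := ∀ (l : List Int), Dom_take_diff l → Spec_take_diff l (take_diff l)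

-- ===== LEMMAS AND PROOFS =====

/-- The values A's loop appends: p, p+t0, p+t0+t1, … -/
def pvScan : List Int → Int → List Int
  | [], _ => []
  | x :: xs, p => p :: pvScan xs (p + x)

theorem pvScan_length (t : List Int) (p : Int) : (pvScan t p).length = t.length := by
  induction t generalizing p with
  | nil => rfl
  | cons x xs ih => simp [pvScan, ih]

theorem pvScan_getElem (t : List Int) (p : Int) (k : Nat) (hk : k < t.length)
    (hk' : k < (pvScan t p).length) :
    (pvScan t p)[k] = p + (t.take k).sum := by
  induction t generalizing p k with
  | nil => simp at hk
  | cons x xs ih =>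
    cases k with
    | zero => simp [pvScan]
    | succ k =>
      simp only [pvScan, List.getElem_cons_succ, List.take_succ_cons, List.sum_cons]
      rw [ih (p + x) k (by simpa using hk) (by have h := hk; simp at h; simpa [pvScan_length] using h)]
      ring

theorem foldl_eq_pvScan (t : List Int) : ∀ (acc : List Int) (p : Int),
    (t.foldl (fun (s : List Int × Int) x => (s.1 ++ [s.2], s.2 + x)) (acc, p)).1
      = acc ++ pvScan t p := by
  induction t with
  | nil => intro acc p; simp [pvScan]
  | cons x xs ih =>
    intro acc p
    simp only [List.foldl_cons, pvScan]
    rw [ih (acc ++ [p]) (p + x)]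
    simp

theorem take_diff_eq_pvScan (l : List Int) :
    take_diff l = pvScan ((PySem.List.pyRange 1 (l.length : Int) 1).map
      (fun i => PySem.List.pyGetD l i 0 - PySem.List.pyGetD l (i - 1) 0)) 5 := by
  simp only [take_diff]
  rw [foldl_eq_pvScan]
  simp

theorem temp_getElem (l : List Int) (k : Nat) (hk : k + 1 < l.length)
    (hk' : k < ((PySem.List.pyRange 1 (l.length : Int) 1).map
      (fun i => PySem.List.pyGetD l i 0 - PySem.List.pyGetD l (i - 1) 0)).length) :
    ((PySem.List.pyRange 1 (l.length : Int) 1).map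
      (fun i => PySem.List.pyGetD l i 0 - PySem.List.pyGetD l (i - 1) 0))[k]
      = l[k + 1] - l[k] := by
  rw [List.getElem_map, PySem.List.getElem_pyRange_one]
  have h1 : (1 : Int) + (k : Int) = ((k + 1 : Nat) : Int) := by omega
  rw [h1, show ((k + 1 : Nat) : Int) - 1 = ((k : Nat) : Int) by omega]
  rw [PySem.List.pyGetD_natCast, PySem.List.pyGetD_natCast]
  rw [List.getD_eq_getElem l 0 hk, List.getD_eq_getElem l 0 (by omega)]

theorem temp_take_sum (l : List Int) (k : Nat) (hk : k < l.length) :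
    (((PySem.List.pyRange 1 (l.length : Int) 1).map
      (fun i => PySem.List.pyGetD l i 0 - PySem.List.pyGetD l (i - 1) 0)).take k).sum
      = l[k]'hk - l[0]'(by omega) := by
  induction k with
  | zero => simp
  | succ k ih =>
    have hlen : k < ((PySem.List.pyRange 1 (l.length : Int) 1).map
        (fun i => PySem.List.pyGetD l i 0 - PySem.List.pyGetD l (i - 1) 0)).length := by
      simp [PySem.List.length_pyRange_one]; omega
    rw [List.take_add_one, List.sum_append, List.getElem?_eq_getElem hlen]
    rw [ih (by omega), temp_getElem l k hk hlen]
    simp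

-- ===== VERDICT (by name: the statement is the Claim_ definition above) =====
theorem take_diff_spec : Claim_equal_take_diff := by
  intro l _
  unfold Spec_take_diff
  rw [take_diff_eq_pvScan]
  apply List.ext_getElem
  · simp [pvScan_length, take_diff_alt, PySem.List.length_pyRange_one]
  · intro k hk1 hk2
    have hkl : k + 1 < l.length := by
      simp [pvScan_length, PySem.List.length_pyRange_one] at hk1; omega
    rw [pvScan_getElem _ _ _ (by simp [PySem.List.length_pyRange_one]; omega) hk1]
    rw [temp_take_sum l k (by omega)]
    simp only [take_diff_alt, List.getElem_map, PySem.List.getElem_pyRange_one]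
    have h0 : (0 : Int) + (k : Int) = ((k : Nat) : Int) := by ring
    rw [h0, PySem.List.pyGetD_natCast]
    rw [show ((0:Int)) = ((0 : Nat) : Int) by rfl, PySem.List.pyGetD_natCast]
    rw [List.getD_eq_getElem l _ (show k < l.length by omega),
       List.getD_eq_getElem l _ (show 0 < l.length by omega)]
    ring
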